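-- pv_equiv track=rewrite | github.com/sokancha/Algorithm_study | 7week/7week_8번.py | solution
-- ===== SOURCE A (Python) =====
-- def solution(n, left, right):
--     answer = [None] * (right - left + 1)
--     list = [None] * n ** 2
--     index = 0
--
--     for a in range(1, n + 1):
--         for _ in range(1, a + 1):
--             list[index] = a
--             index += 1
--         for b in range(a, n):
--             list[index] = b + 1
--             index += 1
--
--     i = 0
--     for c in list[left:right + 1]:
--         answer[i] = c
--         i += 1
--
--     return answer
-- ===== SOURCE B (Python) =====
-- def solution(n, left, right):
--     return [max(k // n, k % n) + 1 for k in range(left, right + 1)]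
-- ===== Notes on version B (the rewrite author's own statement) =====
-- stated objective: faster
-- what changed: B replaces A's O(n^2) materialisation of the whole flattened matrix followed by a slice-copy with a direct per-index closed form max(k//n, k%n)+1 computed only for k in [left, right].
-- outside the precondition, e.g. on solution(2, -4, -2): A returns [1, 2, 2], B returns [1, 2, 1]; on solution(2, 0, 4): A returns [1, 2, 2, 2, None], B returns [1, 2, 2, 2, 3]
import Mathlib
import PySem

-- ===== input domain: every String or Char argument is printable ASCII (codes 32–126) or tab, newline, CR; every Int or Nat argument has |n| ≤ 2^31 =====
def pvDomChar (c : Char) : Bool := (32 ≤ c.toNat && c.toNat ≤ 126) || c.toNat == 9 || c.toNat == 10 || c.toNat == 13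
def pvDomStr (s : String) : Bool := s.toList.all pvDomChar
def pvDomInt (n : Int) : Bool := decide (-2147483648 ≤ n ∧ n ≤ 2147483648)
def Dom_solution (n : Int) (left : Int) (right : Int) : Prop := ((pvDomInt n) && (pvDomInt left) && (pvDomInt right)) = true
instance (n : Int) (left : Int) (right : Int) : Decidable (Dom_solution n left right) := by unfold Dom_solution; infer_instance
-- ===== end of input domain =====

-- B computes each requested cell of the flattened max-matrix directly as max(k//n, k%n)+1
-- instead of materialising all n^2 cells and slicing (objective: faster, asymptotically).


-- ===== PORT A =====
-- The two Python buffers hold `None` placeholders, modelled as `Option Int`; `list[index] = v`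
-- is `pySetD` (in range on every write inside Pre_). Inside Pre_ every returned cell has been
-- overwritten, so the trailing `Option.getD 0` never surfaces a default.
def solution (n : Int) (left : Int) (right : Int) : List Int :=
  let answer : List (Option Int) := List.replicate (right - left + 1).toNat none
  let lst : List (Option Int) := List.replicate (n ^ 2).toNat none
  let built :=
    (PySem.List.pyRange 1 (n + 1) 1).foldl
      (fun (st : List (Option Int) × Int) a =>
        let st := (PySem.List.pyRange 1 (a + 1) 1).foldl
          (fun (st : List (Option Int) × Int) _ =>
            (PySem.List.pySetD st.1 st.2 (some a), st.2 + 1)) st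
        (PySem.List.pyRange a n 1).foldl
          (fun (st : List (Option Int) × Int) b =>
            (PySem.List.pySetD st.1 st.2 (some (b + 1)), st.2 + 1)) st)
      (lst, 0)
  let filled :=
    (PySem.List.slice built.1 (some left) (some (right + 1))).foldl
      (fun (st : List (Option Int) × Int) c =>
        (PySem.List.pySetD st.1 st.2 c, st.2 + 1)) (answer, 0)
  filled.1.map (fun o => o.getD 0)

-- ===== PORT B =====
def solution_alt (n : Int) (left : Int) (right : Int) : List Int :=
  (PySem.List.pyRange left (right + 1) 1).map
    (fun k => max (PySem.Int.floordiv k n) (PySem.Int.mod k n) + 1)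

-- ===== PRECONDITION & SPEC =====
-- Pre_ is the problem's natural domain (1 ≤ n, 0 ≤ left ≤ right+1 ≤ n²) plus the degenerate
-- right < left inputs whose answer and slice are both empty (both programs return []). Outside it
-- A either raises IndexError, or returns a list still containing None (not a List Int), or — for
-- negative slice bounds in wrap range — returns ints positioned by Python's negative-index slice
-- wraparound rather than by matrix position; B indexes the matrix directly there.
def Pre_solution (n : Int) (left : Int) (right : Int) : Prop :=
  (1 ≤ n ∧ 0 ≤ left ∧ left ≤ right + 1 ∧ right + 1 ≤ n ^ 2) ∨
  (right + 1 ≤ left ∧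
    PySem.List.clampIdx (n ^ 2).toNat (right + 1) ≤ PySem.List.clampIdx (n ^ 2).toNat left)
instance (n : Int) (left : Int) (right : Int) : Decidable (Pre_solution n left right) := by
  unfold Pre_solution; infer_instance
def pvWitness_solution : Int × Int × Int := (3, 2, 5)
def Spec_solution (n : Int) (left : Int) (right : Int) (out : List Int) : Prop := out = solution_alt n left right
instance (n : Int) (left : Int) (right : Int) (out : List Int) : Decidable (Spec_solution n left right out) := by unfold Spec_solution; infer_instance

-- ===== CLAIM (what is proved, stated in full; the proofs are below) =====
def Claim_equal_solution : Prop := ∀ (n : Int) (left : Int) (right : Int), Dom_solution n left right → Pre_solution n left right → Spec_solution n left right (solution n left right)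

-- ===== LEMMAS AND PROOFS =====

-- One sequential write `buf[index] = w; index += 1`, the loop body shared by A's three loops.
def wstep (st : List (Option Int) × Int) (w : Option Int) : List (Option Int) × Int :=
  (PySem.List.pySetD st.1 st.2 w, st.2 + 1)

-- A run of sequential writes that fits in the buffer splices the written values in.
theorem writeSeq_spec (ws : List (Option Int)) : ∀ (l : List (Option Int)) (i : Nat),
    i + ws.length ≤ l.length →
    ws.foldl wstep (l, (i : Int)) =
      (l.take i ++ ws ++ l.drop (i + ws.length), ((i + ws.length : Nat) : Int)) := by
  induction ws with
  | nil => intro l i h; simp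
  | cons w ws ih =>
    intro l i h
    have hi : i < l.length := by simp at h; omega
    have hstep : wstep (l, (i : Int)) w = (l.set i w, ((i + 1 : Nat) : Int)) := by
      simp [wstep]
    have hlen : i + 1 + ws.length ≤ (l.set i w).length := by
      simp at h ⊢; omega
    rw [List.foldl_cons, hstep, ih _ _ hlen]
    rw [List.set_eq_take_cons_drop w hi]
    have h1 : List.take (i + 1) (List.take i l ++ w :: List.drop (i + 1) l) = List.take i l ++ [w] := by
      rw [List.take_append]
      simp [Nat.min_eq_left (le_of_lt hi)]
    have h2 : List.drop (i + 1 + ws.length) (List.take i l ++ w :: List.drop (i + 1) l)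
        = List.drop (i + 1 + ws.length) l := by
      have h : List.take i l ++ w :: List.drop (i + 1) l
          = (List.take i l ++ [w]) ++ List.drop (i + 1) l := by simp
      rw [h]
      have hlen' : (List.take i l ++ [w]).length = i + 1 := by
        simp [Nat.min_eq_left (le_of_lt hi)]
      have h3 := List.drop_length_add_append (l₁ := List.take i l ++ [w])
        (l₂ := List.drop (i + 1) l) (i := ws.length)
      rw [hlen'] at h3
      rw [h3, List.drop_drop]
    rw [h1, h2]
    simp
    constructor <;> omega

theorem foldl_const {α β γ : Type} (l : List α) (g : β → γ → β) (c : γ) (init : β) :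
    l.foldl (fun st _ => g st c) init = (List.replicate l.length c).foldl g init := by
  induction l generalizing init <;> simp [List.replicate_succ, *]

theorem foldl_flatMap {α β σ : Type} (g : σ → β → σ) (chunk : α → List β) :
    ∀ (l : List α) (st : σ),
    l.foldl (fun st a => (chunk a).foldl g st) st = (l.flatMap chunk).foldl g st := by
  intro l
  induction l with
  | nil => intro st; rfl
  | cons x l ih => intro st; simp [List.foldl_append, ih]

-- The block of writes A performs for one outer-loop value a (as Option values).
def chunkO (n a : Int) : List (Option Int) :=
  List.replicate a.toNat (some a) ++ (PySem.List.pyRange a n 1).map (fun b => some (b + 1))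

-- Row q of the matrix is r ↦ max q r + 1.
theorem chunk_eq (N q : Nat) (hq : q < N) :
    chunkO (N : Int) (1 + (q : Int)) =
      (List.range N).map (fun r => some (((max q r : Nat) : Int) + 1)) := by
  unfold chunkO
  have hsplit : N = (q + 1) + (N - (q + 1)) := by omega
  rw [hsplit, List.range_add, List.map_append]
  congr 1
  · have h1 : ∀ r ∈ List.range (q + 1), some (((max q r : Nat) : Int) + 1) = some ((1 : Int) + (q : Int)) := by
      intro r hr
      rw [List.mem_range] at hr
      have : max q r = q := by omega
      rw [this]; ring_nf
    rw [List.map_congr_left h1]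
    have : ((1 : Int) + (q : Nat)).toNat = q + 1 := by omega
    rw [this]
    simp
  · rw [PySem.List.pyRange_one]
    have : (((q + 1 + (N - (q + 1)) : Nat) : Int) - (1 + (q : Nat))).toNat = N - (q + 1) := by omega
    rw [this, List.map_map, List.map_map]
    apply List.map_congr_left
    intro j hj
    rw [List.mem_range] at hj
    simp only [Function.comp]
    have : max q (q + 1 + j) = q + 1 + j := by omega
    rw [this]
    congr 1
    push_cast
    ring

-- The whole flattened buffer, cell K ↦ max (K/N) (K%N) + 1.
theorem flat_prefix (N : Nat) : ∀ M, M ≤ N →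
    (List.range M).flatMap (fun (q : Nat) => chunkO (N : Int) (1 + (q : Int)))
      = (List.range (M * N)).map (fun K => some (((max (K / N) (K % N) : Nat) : Int) + 1)) := by
  intro M
  induction M with
  | zero => intro _; simp
  | succ M ih =>
    intro hM
    rw [List.range_succ, List.flatMap_append, ih (by omega)]
    have hr : (M + 1) * N = M * N + N := by ring
    rw [hr, List.range_add, List.map_append]
    congr 1
    · simp only [List.flatMap_cons, List.flatMap_nil, List.append_nil]
      rw [chunk_eq N M (by omega), List.map_map]
      apply List.map_congr_left
      intro r hr2
      rw [List.mem_range] at hr2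
      simp only [Function.comp]
      have h1 : (M * N + r) / N = M := by
        apply Nat.div_eq_of_lt_le <;> nlinarith
      have h2 : (M * N + r) % N = r := by
        rw [Nat.add_comm, Nat.add_mul_mod_self_right]
        exact Nat.mod_eq_of_lt hr2
      rw [h1, h2]

-- ===== VERDICT (by name: the statement is the Claim_ definition above) =====
-- A sequential-write fold never changes the buffer's length.
theorem foldl_pres {α : Type} (F : (List (Option Int) × Int) → α → (List (Option Int) × Int))
    (h : ∀ st a, ((F st a).1).length = st.1.length) :
    ∀ (l : List α) (st : List (Option Int) × Int), ((l.foldl F st).1).length = st.1.length := by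
  intro l
  induction l with
  | nil => intro st; rfl
  | cons x l ih => intro st; rw [List.foldl_cons, ih, h]

-- ===== VERDICT continued =====
theorem solution_spec : Claim_equal_solution := by
  intro n left right _ hpre
  rcases hpre with hpre | ⟨hrl, hclamp⟩
  case inr =>
    -- empty-result case: answer is [] and the slice is empty, both sides return []
    unfold Spec_solution solution_alt
    rw [PySem.List.pyRange_one_eq_nil hrl, List.map_nil]
    simp only [solution]
    have hans : (right - left + 1).toNat = 0 := by omega
    have hlen : (PySem.List.slice
        (((PySem.List.pyRange 1 (n + 1) 1).foldl
          (fun (st : List (Option Int) × Int) a =>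
            (PySem.List.pyRange a n 1).foldl
              (fun (st : List (Option Int) × Int) b =>
                (PySem.List.pySetD st.1 st.2 (some (b + 1)), st.2 + 1))
              ((PySem.List.pyRange 1 (a + 1) 1).foldl
                (fun (st : List (Option Int) × Int) _ =>
                  (PySem.List.pySetD st.1 st.2 (some a), st.2 + 1)) st))
          (List.replicate (n ^ 2).toNat none, 0)).1)
        (some left) (some (right + 1))).length = 0 := by
      rw [PySem.List.length_slice]
      have hbl : ((PySem.List.pyRange 1 (n + 1) 1).foldl
          (fun (st : List (Option Int) × Int) a =>
            (PySem.List.pyRange a n 1).foldl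
              (fun (st : List (Option Int) × Int) b =>
                (PySem.List.pySetD st.1 st.2 (some (b + 1)), st.2 + 1))
              ((PySem.List.pyRange 1 (a + 1) 1).foldl
                (fun (st : List (Option Int) × Int) _ =>
                  (PySem.List.pySetD st.1 st.2 (some a), st.2 + 1)) st))
          (List.replicate (n ^ 2).toNat none, 0)).1.length = (n ^ 2).toNat := by
        rw [foldl_pres]
        · simp
        · intro st a
          rw [foldl_pres, foldl_pres]
          · intro st b; simp [PySem.List.length_pySetD]
          · intro st b; simp [PySem.List.length_pySetD]
      rw [hbl]
      omega
    rw [List.eq_nil_of_length_eq_zero hlen, hans]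
    simp
  obtain ⟨hn, hl, hlr, hr⟩ := hpre
  unfold Spec_solution
  set N : Nat := n.toNat with hNdef
  set L : Nat := left.toNat with hLdef
  set m : Nat := (right - left + 1).toNat with hmdef
  have hnN : n = (N : Int) := by omega
  have hlL : left = (L : Int) := by omega
  have hNN : (n ^ 2).toNat = N * N := by
    rw [hnN, ← Nat.cast_pow, Int.toNat_natCast, pow_two]
  have hLm : L + m ≤ N * N := by
    have h1 : (right + 1).toNat ≤ (n ^ 2).toNat := by omega
    omega
  -- abbreviations for the characterised buffer
  set g : Nat → Int := fun K => ((max (K / N) (K % N) : Nat) : Int) + 1 with hgdef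
  -- Step 1: the building loop is a sequence of chunk writes
  have hbody : (fun (st : List (Option Int) × Int) a =>
      (PySem.List.pyRange a n 1).foldl
        (fun (st : List (Option Int) × Int) b =>
          (PySem.List.pySetD st.1 st.2 (some (b + 1)), st.2 + 1))
        ((PySem.List.pyRange 1 (a + 1) 1).foldl
          (fun (st : List (Option Int) × Int) _ =>
            (PySem.List.pySetD st.1 st.2 (some a), st.2 + 1)) st))
      = fun st a => (chunkO n a).foldl wstep st := by
    funext st a
    show (PySem.List.pyRange a n 1).foldl (fun st b => wstep st (some (b + 1)))
        ((PySem.List.pyRange 1 (a + 1) 1).foldl (fun st _ => wstep st (some a)) st)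
      = (chunkO n a).foldl wstep st
    rw [chunkO, List.foldl_append, ← List.foldl_map, foldl_const, PySem.List.length_pyRange_one]
    have : (a + 1 - 1 : Int) = a := by ring
    rw [this]
  have hflat : (PySem.List.pyRange 1 (n + 1) 1).flatMap (chunkO n)
      = (List.range (N * N)).map (fun K => some (g K)) := by
    rw [hnN, PySem.List.pyRange_one]
    have h1 : ((N : Int) + 1 - 1).toNat = N := by omega
    rw [h1, List.flatMap_map]
    exact flat_prefix N N (le_refl N)
  have hbuilt : ((PySem.List.pyRange 1 (n + 1) 1).foldl
      (fun (st : List (Option Int) × Int) a =>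
        (PySem.List.pyRange a n 1).foldl
          (fun (st : List (Option Int) × Int) b =>
            (PySem.List.pySetD st.1 st.2 (some (b + 1)), st.2 + 1))
          ((PySem.List.pyRange 1 (a + 1) 1).foldl
            (fun (st : List (Option Int) × Int) _ =>
              (PySem.List.pySetD st.1 st.2 (some a), st.2 + 1)) st))
      (List.replicate (n ^ 2).toNat none, 0)).1
      = (List.range (N * N)).map (fun K => some (g K)) := by
    rw [hbody, foldl_flatMap, hflat, hNN]
    have h0 : (0 : Int) = ((0 : Nat) : Int) := rfl
    rw [h0, writeSeq_spec _ _ 0 (by simp)]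
    simp [List.drop_replicate]
  -- Step 2: the slice
  have hslice : PySem.List.slice ((List.range (N * N)).map (fun K => some (g K)))
        (some left) (some (right + 1))
      = (((List.range (N * N)).drop L).take m).map (fun K => some (g K)) := by
    rw [PySem.List.slice_toNat _ hl (by omega)]
    have h1 : (right + 1).toNat - left.toNat = m := by omega
    rw [h1, ← hLdef, ← List.map_drop, ← List.map_take]
  have hlen_sl : ((((List.range (N * N)).drop L).take m).map
      (fun K => some (g K))).length = m := by
    simp; omega
  -- Step 3: the answer-filling loop just copies the slice
  have hfill : ∀ sl : List (Option Int), sl.length = m →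
      (sl.foldl (fun (st : List (Option Int) × Int) c =>
        (PySem.List.pySetD st.1 st.2 c, st.2 + 1))
        (List.replicate (right - left + 1).toNat none, 0)).1 = sl := by
    intro sl hsl
    show (sl.foldl wstep (List.replicate (right - left + 1).toNat none, 0)).1 = sl
    have h0 : (0 : Int) = ((0 : Nat) : Int) := rfl
    rw [h0, writeSeq_spec _ _ 0 (by simp [hsl]; omega)]
    simp [List.drop_replicate, hsl]
    omega
  -- Put the A side together
  simp only [solution]
  rw [hbuilt, hslice, hfill _ hlen_sl, List.map_map]
  -- Compare with B elementwise
  unfold solution_alt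
  rw [PySem.List.pyRange_one]
  have hm' : (right + 1 - left).toNat = m := by omega
  rw [hm', List.map_map]
  apply List.ext_getElem
  · simp; omega
  · intro j h1 h2
    simp only [List.getElem_map, List.getElem_take, List.getElem_drop, List.getElem_range,
      Function.comp, Option.getD_some]
    have hj : j < m := by simp at h1; omega
    have hcast : left + (j : Int) = ((L + j : Nat) : Int) := by push_cast; omega
    rw [hcast, hnN, PySem.Int.floordiv_natCast, PySem.Int.mod_natCast, hgdef]
    simp [Nat.cast_max]
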